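-- pv_equiv track=rewrite | github.com/JesusHernandez223258/Grafics_AG | utils/keyboard_utils.py | get_function_complexity
-- ===== SOURCE A (Python) =====
-- def get_function_complexity(function_text):
--     """
--     Calcula la complejidad de una función basada en operadores y funciones
--
--     Args:
--         function_text: Texto de la función
--
--     Returns:
--         int: Valor de complejidad (mayor es más complejo)
--     """
--     complexity = 0
--
--     # Contar operadores
--     operators = ['+', '-', '*', '/', '^']
--     for op in operators:
--         complexity += function_text.count(op)
--
--     # Contar funciones (más peso)
--     functions = ['sin', 'cos', 'tan', 'exp', 'log', 'ln', 'sqrt', 'abs']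
--     for func in functions:
--         complexity += function_text.count(func) * 2
--
--     # Contar paréntesis anidados (mayor complejidad)
--     max_depth = 0
--     current_depth = 0
--     for char in function_text:
--         if char == '(':
--             current_depth += 1
--             max_depth = max(max_depth, current_depth)
--         elif char == ')':
--             current_depth = max(0, current_depth - 1)
--
--     complexity += max_depth * 3
--
--     return complexity
-- ===== SOURCE B (Python) =====
-- def get_function_complexity(function_text):
--     """One pass over the characters: operators, function-name starts and
--     parenthesis depth are all tallied in a single loop."""
--     functions = ('sin', 'cos', 'tan', 'exp', 'log', 'ln', 'sqrt', 'abs')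
--     complexity = 0
--     current_depth = 0
--     max_depth = 0
--     for i, ch in enumerate(function_text):
--         if ch in '+-*/^':
--             complexity += 1
--         elif ch == '(':
--             current_depth += 1
--             if current_depth > max_depth:
--                 max_depth = current_depth
--         elif ch == ')':
--             current_depth = max(0, current_depth - 1)
--         for func in functions:
--             if function_text.startswith(func, i):
--                 complexity += 2
--     return complexity + max_depth * 3
-- ===== Notes on version B (the rewrite author's own statement) =====
-- stated objective: alternative
-- what changed: Replaces A's 13 separate full-string .count scans plus a 14th depth pass with a single pass over the characters that tallies operators, function-name starts and parenthesis depth together.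
import Mathlib
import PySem

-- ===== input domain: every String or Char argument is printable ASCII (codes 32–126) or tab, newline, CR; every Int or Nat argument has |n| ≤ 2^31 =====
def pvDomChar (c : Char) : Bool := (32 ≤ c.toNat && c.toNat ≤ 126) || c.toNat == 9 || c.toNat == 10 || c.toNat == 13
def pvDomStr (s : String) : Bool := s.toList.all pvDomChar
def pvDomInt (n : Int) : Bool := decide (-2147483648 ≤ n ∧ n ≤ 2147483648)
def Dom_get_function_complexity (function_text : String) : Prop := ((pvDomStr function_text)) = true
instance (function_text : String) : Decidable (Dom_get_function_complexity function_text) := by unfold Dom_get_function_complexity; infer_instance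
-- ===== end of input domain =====

-- B replaces A's 13 separate full-string count scans plus a depth pass by one single pass
-- over the characters tallying operators, function-name starts and parenthesis depth together.

-- ===== PORT A =====
def get_function_complexity (function_text : String) : Int :=
  let complexity : Int := 0
  let operators : List String := ["+", "-", "*", "/", "^"]
  let complexity := operators.foldl (fun acc op => acc + (PySem.Str.count function_text op : Int)) complexity
  let functions : List String := ["sin", "cos", "tan", "exp", "log", "ln", "sqrt", "abs"]
  let complexity := functions.foldl (fun acc func => acc + (PySem.Str.count function_text func : Int) * 2) complexity
  let st := function_text.toList.foldl
      (fun (st : Int × Int) ch =>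
        if ch = '(' then (max st.1 (st.2 + 1), st.2 + 1)
        else if ch = ')' then (st.1, max 0 (st.2 - 1))
        else st) ((0 : Int), (0 : Int))
  complexity + st.1 * 3

-- ===== PORT B =====
def pvAltFunctions : List String := ["sin", "cos", "tan", "exp", "log", "ln", "sqrt", "abs"]
def pvAltOperators : List Char := "+-*/^".toList

-- the single loop over the character positions; the tail (ch :: rest) is the string from index i
def pvAltGo : List Char → Int → Int → Int → Int
  | [], complexity, _current_depth, max_depth => complexity + max_depth * 3
  | ch :: rest, complexity, current_depth, max_depth =>
    let st : Int × Int × Int :=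
      if ch ∈ pvAltOperators then (complexity + 1, current_depth, max_depth)
      else if ch = '(' then (complexity, current_depth + 1, max max_depth (current_depth + 1))
      else if ch = ')' then (complexity, max 0 (current_depth - 1), max_depth)
      else (complexity, current_depth, max_depth)
    pvAltGo rest
      (pvAltFunctions.foldl (fun acc func => if PySem.Chars.startswith (ch :: rest) func.toList then acc + 2 else acc) st.1)
      st.2.1 st.2.2

def get_function_complexity_alt (function_text : String) : Int :=
  pvAltGo function_text.toList 0 0 0

-- ===== PRECONDITION & SPEC =====
def Spec_get_function_complexity (function_text : String) (out : Int) : Prop := out = get_function_complexity_alt function_text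
instance (function_text : String) (out : Int) : Decidable (Spec_get_function_complexity function_text out) := by unfold Spec_get_function_complexity; infer_instance

-- ===== CLAIM (what is proved, stated in full; the proofs are below) =====
def Claim_equal_get_function_complexity : Prop := ∀ (function_text : String), Dom_get_function_complexity function_text → Spec_get_function_complexity function_text (get_function_complexity function_text)

-- ===== LEMMAS AND PROOFS =====

-- number of positions (tails) of cs at which f occurs
def pvOcc (f : List Char) : List Char → Nat
  | [] => 0
  | c :: t => (if f.isPrefixOf (c :: t) then 1 else 0) + pvOcc f t

-- f is border-free: no proper nonempty suffix of f is a prefix of f (so occurrences cannot overlap)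
abbrev pvBF (f : List Char) : Prop := ∀ j ∈ List.range f.length, 0 < j → ¬ f.drop j <+: f

lemma pv_isPrefixOf_iff (l₁ l₂ : List Char) : l₁.isPrefixOf l₂ = true ↔ l₁ <+: l₂ :=
  List.isPrefixOf_iff_prefix

lemma pv_single_isPrefixOf (a c : Char) (t : List Char) :
    ([a].isPrefixOf (c :: t)) = (a == c) := by
  simp [List.isPrefixOf]

-- at a border-free occurrence, the next f.length - 1 positions carry no occurrence
lemma pvOcc_drop (f l : List Char) (hbf : pvBF f) (hne : f ≠ []) (hp : f <+: l) :
    ∀ j, 0 < j → j ≤ f.length → pvOcc f l = 1 + pvOcc f (l.drop j) := by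
  intro j
  induction j with
  | zero => intro h; omega
  | succ j ih =>
    intro _ hj
    rcases Nat.eq_zero_or_pos j with h0 | hjpos
    · subst h0
      obtain ⟨c, t, rfl⟩ : ∃ c t, l = c :: t := by
        cases l with
        | nil => exact absurd (List.prefix_nil.mp hp) hne
        | cons c t => exact ⟨c, t, rfl⟩
      have hpt : f.isPrefixOf (c :: t) = true := (pv_isPrefixOf_iff _ _).mpr hp
      simp [pvOcc, hpt]
    · rw [ih hjpos (by omega)]
      have hjlen : j < f.length := by omega
      have hlen : f.length ≤ l.length := hp.length_le
      have hne' : l.drop j ≠ [] := by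
        intro h
        have := congrArg List.length h
        simp at this
        omega
      obtain ⟨c, t, hct⟩ : ∃ c t, l.drop j = c :: t := by
        cases hdp : l.drop j with
        | nil => exact absurd hdp hne'
        | cons c t => exact ⟨c, t, rfl⟩
      have hnp : ¬ f <+: l.drop j := by
        intro hpj
        obtain ⟨r, rfl⟩ := hp
        have hdj : (f ++ r).drop j = f.drop j ++ r := List.drop_append_of_le_length (by omega)
        have h1 : f.drop j <+: (f ++ r).drop j := by
          rw [hdj]; exact List.prefix_append _ _
        have h2 : f.drop j <+: f :=
          List.prefix_of_prefix_length_le h1 hpj (by simp)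
        exact hbf j (List.mem_range.mpr hjlen) hjpos h2
      have hfb : f.isPrefixOf (c :: t) = false := by
        rw [← hct]
        exact Bool.eq_false_iff.mpr (fun h => hnp ((pv_isPrefixOf_iff _ _).mp h))
      have ht : t = l.drop (j + 1) := by
        have : (l.drop j).tail = l.drop (j + 1) := by
          rw [← List.drop_drop]; simp
        rw [← this, hct]
        rfl
      rw [hct, ht]
      have hnp' : ¬ f <+: c :: List.drop (j + 1) l := by
        rw [← ht, ← hct]; exact hnp
      simp [pvOcc, hnp']

lemma pvCountGo (f : List Char) (hbf : pvBF f) (hne : f ≠ []) (fuel : Nat) :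
    ∀ s acc, s.length ≤ fuel → PySem.Chars.count.go f fuel s acc = acc + pvOcc f s := by
  induction fuel with
  | zero =>
    intro s acc h
    have : s = [] := List.eq_nil_of_length_eq_zero (by omega)
    subst this
    simp [PySem.Chars.count.go, pvOcc]
  | succ fuel ih =>
    intro s acc h
    cases s with
    | nil => simp [PySem.Chars.count.go, pvOcc]
    | cons c t =>
      rw [PySem.Chars.count.go]
      by_cases hp : f.isPrefixOf (c :: t) = true
      · have hflen : 1 ≤ f.length := by
          cases f with
          | nil => exact absurd rfl hne
          | cons _ _ => simp
        simp only [hp, if_true]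
        rw [ih _ _ (by simp at h ⊢; omega)]
        rw [pvOcc_drop f (c :: t) hbf hne ((pv_isPrefixOf_iff _ _).mp hp) f.length hflen le_rfl]
        omega
      · simp only [Bool.not_eq_true] at hp
        simp only [hp, Bool.false_eq_true, if_false]
        rw [ih t acc (by simp at h ⊢; omega)]
        simp [pvOcc, hp]

lemma pvCount_eq (f cs : List Char) (hbf : pvBF f) (hne : f ≠ []) :
    PySem.Chars.count cs f = pvOcc f cs := by
  unfold PySem.Chars.count
  have hfe : f.isEmpty = false := by
    cases f with
    | nil => exact absurd rfl hne
    | cons c t => rfl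
  rw [hfe]
  simp only [Bool.false_eq_true, if_false]
  rw [pvCountGo f hbf hne cs.length cs 0 le_rfl]
  omega

-- token literals as char lists
lemma pv_tl_plus : "+".toList = ['+'] := rfl
lemma pv_tl_minus : "-".toList = ['-'] := rfl
lemma pv_tl_star : "*".toList = ['*'] := rfl
lemma pv_tl_slash : "/".toList = ['/'] := rfl
lemma pv_tl_caret : "^".toList = ['^'] := rfl
lemma pv_tl_sin : "sin".toList = ['s','i','n'] := rfl
lemma pv_tl_cos : "cos".toList = ['c','o','s'] := rfl
lemma pv_tl_tan : "tan".toList = ['t','a','n'] := rfl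
lemma pv_tl_exp : "exp".toList = ['e','x','p'] := rfl
lemma pv_tl_log : "log".toList = ['l','o','g'] := rfl
lemma pv_tl_ln : "ln".toList = ['l','n'] := rfl
lemma pv_tl_sqrt : "sqrt".toList = ['s','q','r','t'] := rfl
lemma pv_tl_abs : "abs".toList = ['a','b','s'] := rfl
lemma pv_ops_eq : pvAltOperators = ['+', '-', '*', '/', '^'] := rfl

-- the common closed form: weighted sum of occurrence counts
def pvBody (cs : List Char) : Int :=
  (pvOcc ['+'] cs : Int) + (pvOcc ['-'] cs : Int) + (pvOcc ['*'] cs : Int)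
  + (pvOcc ['/'] cs : Int) + (pvOcc ['^'] cs : Int)
  + 2 * (pvOcc ['s','i','n'] cs : Int) + 2 * (pvOcc ['c','o','s'] cs : Int)
  + 2 * (pvOcc ['t','a','n'] cs : Int) + 2 * (pvOcc ['e','x','p'] cs : Int)
  + 2 * (pvOcc ['l','o','g'] cs : Int) + 2 * (pvOcc ['l','n'] cs : Int)
  + 2 * (pvOcc ['s','q','r','t'] cs : Int) + 2 * (pvOcc ['a','b','s'] cs : Int)

lemma pvFoldTwo (l : List String) (p : String → Bool) (a : Int) :
    l.foldl (fun acc func => if p func then acc + 2 else acc) a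
      = a + 2 * (l.countP p : Int) := by
  induction l generalizing a with
  | nil => simp
  | cons x xs ih =>
    simp only [List.foldl_cons, List.countP_cons]
    rw [ih]
    by_cases hx : p x = true
    · simp only [hx, if_true]; push_cast; ring
    · simp only [Bool.not_eq_true] at hx
      simp only [hx, Bool.false_eq_true, if_false]; push_cast; ring

set_option maxRecDepth 8192 in
lemma pvBody_cons (c : Char) (t : List Char) :
    pvBody (c :: t) = (if c ∈ pvAltOperators then (1 : Int) else 0)
      + 2 * (pvAltFunctions.countP (fun func => PySem.Chars.startswith (c :: t) func.toList) : Int)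
      + pvBody t := by
  by_cases h : c ∈ pvAltOperators
  · rw [pv_ops_eq] at h
    simp only [List.mem_cons, List.not_mem_nil, or_false] at h
    rcases h with h | h | h | h | h <;> subst h <;>
      simp [pvBody, pvOcc, pvAltFunctions, PySem.Chars.startswith,
        List.isPrefixOf, pv_ops_eq, pv_tl_sin, pv_tl_cos, pv_tl_tan, pv_tl_exp,
        pv_tl_log, pv_tl_ln, pv_tl_sqrt, pv_tl_abs] <;>
      ring
  · have h' := h
    rw [pv_ops_eq] at h'
    simp only [List.mem_cons, List.not_mem_nil, or_false, not_or] at h'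
    obtain ⟨h1, h2, h3, h4, h5⟩ := h'
    have e1 : ('+' == c) = false := beq_eq_false_iff_ne.mpr (Ne.symm h1)
    have e2 : ('-' == c) = false := beq_eq_false_iff_ne.mpr (Ne.symm h2)
    have e3 : ('*' == c) = false := beq_eq_false_iff_ne.mpr (Ne.symm h3)
    have e4 : ('/' == c) = false := beq_eq_false_iff_ne.mpr (Ne.symm h4)
    have e5 : ('^' == c) = false := beq_eq_false_iff_ne.mpr (Ne.symm h5)
    simp only [pvBody, pvOcc, pvAltFunctions, PySem.Chars.startswith, List.countP_cons,
      List.countP_nil, pv_tl_sin, pv_tl_cos, pv_tl_tan, pv_tl_exp, pv_tl_log, pv_tl_ln,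
      pv_tl_sqrt, pv_tl_abs, pv_single_isPrefixOf, if_neg h,
      e1, e2, e3, e4, e5, Bool.false_eq_true, if_false]
    push_cast
    ring

set_option maxRecDepth 8192 in
lemma pvOps_notParen : ∀ c ∈ pvAltOperators, c ≠ '(' ∧ c ≠ ')' := by
  intro c hc
  simp only [pv_ops_eq, List.mem_cons, List.not_mem_nil, or_false] at hc
  rcases hc with rfl | rfl | rfl | rfl | rfl <;> exact ⟨by decide, by decide⟩

lemma pvAltGo_cons (c : Char) (t : List Char) (comp cur mx : Int) :
    pvAltGo (c :: t) comp cur mx =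
      pvAltGo t
        (pvAltFunctions.foldl
          (fun acc func => if PySem.Chars.startswith (c :: t) func.toList then acc + 2 else acc)
          ((if c ∈ pvAltOperators then ((comp + 1 : Int), cur, mx)
            else if c = '(' then (comp, cur + 1, max mx (cur + 1))
            else if c = ')' then (comp, max 0 (cur - 1), mx)
            else (comp, cur, mx)) : Int × Int × Int).1)
        ((if c ∈ pvAltOperators then ((comp + 1 : Int), cur, mx)
          else if c = '(' then (comp, cur + 1, max mx (cur + 1))
          else if c = ')' then (comp, max 0 (cur - 1), mx)
          else (comp, cur, mx)) : Int × Int × Int).2.1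
        ((if c ∈ pvAltOperators then ((comp + 1 : Int), cur, mx)
          else if c = '(' then (comp, cur + 1, max mx (cur + 1))
          else if c = ')' then (comp, max 0 (cur - 1), mx)
          else (comp, cur, mx)) : Int × Int × Int).2.2 := rfl

lemma pvAltGo_closed (cs : List Char) : ∀ comp cur mx : Int,
    pvAltGo cs comp cur mx
      = comp + pvBody cs
        + (cs.foldl
            (fun (st : Int × Int) ch =>
              if ch = '(' then (max st.1 (st.2 + 1), st.2 + 1)
              else if ch = ')' then (st.1, max 0 (st.2 - 1))
              else st) (mx, cur)).1 * 3 := by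
  induction cs with
  | nil => intro comp cur mx; simp [pvAltGo, pvBody]
  | cons c t ih =>
    intro comp cur mx
    rw [pvAltGo_cons, pvFoldTwo, ih, pvBody_cons]
    by_cases h1 : c ∈ pvAltOperators
    · obtain ⟨hp1, hp2⟩ := pvOps_notParen c h1
      simp only [if_pos h1, List.foldl_cons, if_neg hp1, if_neg hp2]
      ring
    · by_cases h2 : c = '('
      · subst h2
        simp [if_neg h1, List.foldl_cons]
      · by_cases h3 : c = ')'
        · subst h3
          simp [if_neg h1, List.foldl_cons]
        · simp only [if_neg h1, if_neg h2, if_neg h3, List.foldl_cons]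
          ring

lemma pvA_closed (s : String) :
    get_function_complexity s
      = pvBody s.toList
        + (s.toList.foldl
            (fun (st : Int × Int) ch =>
              if ch = '(' then (max st.1 (st.2 + 1), st.2 + 1)
              else if ch = ')' then (st.1, max 0 (st.2 - 1))
              else st) ((0 : Int), (0 : Int))).1 * 3 := by
  unfold get_function_complexity
  simp only [List.foldl_cons, List.foldl_nil, PySem.Str.count_eq,
    pv_tl_plus, pv_tl_minus, pv_tl_star, pv_tl_slash, pv_tl_caret,
    pv_tl_sin, pv_tl_cos, pv_tl_tan, pv_tl_exp, pv_tl_log, pv_tl_ln, pv_tl_sqrt, pv_tl_abs]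
  rw [pvCount_eq ['+'] _ (by decide) (by decide), pvCount_eq ['-'] _ (by decide) (by decide),
      pvCount_eq ['*'] _ (by decide) (by decide), pvCount_eq ['/'] _ (by decide) (by decide),
      pvCount_eq ['^'] _ (by decide) (by decide),
      pvCount_eq ['s','i','n'] _ (by decide) (by decide),
      pvCount_eq ['c','o','s'] _ (by decide) (by decide),
      pvCount_eq ['t','a','n'] _ (by decide) (by decide),
      pvCount_eq ['e','x','p'] _ (by decide) (by decide),
      pvCount_eq ['l','o','g'] _ (by decide) (by decide),
      pvCount_eq ['l','n'] _ (by decide) (by decide),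
      pvCount_eq ['s','q','r','t'] _ (by decide) (by decide),
      pvCount_eq ['a','b','s'] _ (by decide) (by decide)]
  unfold pvBody
  ring

lemma pvB_closed (s : String) :
    get_function_complexity_alt s
      = pvBody s.toList
        + (s.toList.foldl
            (fun (st : Int × Int) ch =>
              if ch = '(' then (max st.1 (st.2 + 1), st.2 + 1)
              else if ch = ')' then (st.1, max 0 (st.2 - 1))
              else st) ((0 : Int), (0 : Int))).1 * 3 := by
  unfold get_function_complexity_alt
  rw [pvAltGo_closed]
  ring

-- ===== VERDICT (by name: the statement is the Claim_ definition above) =====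
theorem get_function_complexity_spec : Claim_equal_get_function_complexity := by
  intro s _
  unfold Spec_get_function_complexity
  rw [pvA_closed, pvB_closed]
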